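-- pv_equiv track=rewrite | github.com/IdaEkmark/Inf-Cryptography | GetKey.py | fracCipher
-- ===== SOURCE A (Python) =====
-- def fracCipher(cipher, keylen):
--     list = []
--     for i in range(keylen):
--         list.append('')
--     i = 0
--     for c in cipher:
--         list[i % keylen] += c
--         i += 1
--     return list
-- ===== SOURCE B (Python) =====
-- def fracCipher(cipher, keylen):
--     return [cipher[i::keylen] for i in range(keylen)]
-- ===== Notes on version B (the rewrite author's own statement) =====
-- stated objective: idiomatic
-- what changed: Replaces the char-by-char loop with a running index modulo keylen by a single list comprehension that extracts each round-robin column as a strided slice cipher[i::keylen].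
import Mathlib
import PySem

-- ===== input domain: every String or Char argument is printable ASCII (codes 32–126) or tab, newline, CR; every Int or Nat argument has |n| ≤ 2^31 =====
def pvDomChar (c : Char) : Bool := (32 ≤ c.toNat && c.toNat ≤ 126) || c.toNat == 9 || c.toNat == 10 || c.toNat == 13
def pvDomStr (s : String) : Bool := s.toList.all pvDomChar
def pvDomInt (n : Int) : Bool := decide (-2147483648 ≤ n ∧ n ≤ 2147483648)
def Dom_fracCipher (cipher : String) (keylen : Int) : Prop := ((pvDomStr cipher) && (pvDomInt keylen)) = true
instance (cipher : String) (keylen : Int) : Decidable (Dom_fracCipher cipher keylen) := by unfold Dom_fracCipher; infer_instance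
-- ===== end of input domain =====

-- B replaces A's char-by-char loop (running counter, index i % keylen) by one strided slice
-- cipher[i::keylen] per column — more idiomatic, same cost; equivalence on the return value.

-- ===== PORT A =====
-- `list[i] += c` on the list of accumulated columns; inside Pre_ the index is always
-- 0 ≤ i < length (Python's i % keylen with keylen ≥ 1), where this is exact.
def pyAppendAt (xs : List (List Char)) (i : Int) (c : Char) : List (List Char) :=
  match xs with
  | [] => []
  | x :: rest => if i = 0 then (x ++ [c]) :: rest else x :: pyAppendAt rest (i - 1) c

def fracCipher (cipher : String) (keylen : Int) : List String :=
  -- i = 0; for c in cipher: list[i % keylen] += c; i += 1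
  (cipher.toList.foldl
      (fun (p : List (List Char) × Int) c =>
        (pyAppendAt p.1 (PySem.Int.mod p.2 keylen) c, p.2 + 1))
      -- initial state: list = []; for i in range(keylen): list.append('')  (columns as List Char)
      ((PySem.List.pyRange 0 keylen 1).foldl (fun acc _ => acc ++ [([] : List Char)]) [], 0)
  ).1.map String.ofList

-- ===== PORT B =====
-- return [cipher[i::keylen] for i in range(keylen)]
def fracCipher_alt (cipher : String) (keylen : Int) : List String :=
  (PySem.List.pyRange 0 keylen 1).map
    (fun i => (PySem.Str.slice? cipher (some i) none keylen).getD "")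

-- ===== PRECONDITION & SPEC =====
-- A raises on keylen ≤ 0 with a non-empty cipher (ZeroDivisionError for keylen = 0,
-- IndexError for keylen < 0); exactly those inputs are excluded.
def Pre_fracCipher (cipher : String) (keylen : Int) : Prop := 1 ≤ keylen ∨ cipher = ""
instance (cipher : String) (keylen : Int) : Decidable (Pre_fracCipher cipher keylen) := by
  unfold Pre_fracCipher; infer_instance

def pvWitness_fracCipher : String × Int := ("attackatdawn", 4)

def Spec_fracCipher (cipher : String) (keylen : Int) (out : List String) : Prop :=
  out = fracCipher_alt cipher keylen
instance (cipher : String) (keylen : Int) (out : List String) : Decidable (Spec_fracCipher cipher keylen out) := by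
  unfold Spec_fracCipher; infer_instance

-- ===== CLAIM (what is proved, stated in full; the proofs are below) =====
def Claim_equal_fracCipher : Prop := ∀ (cipher : String) (keylen : Int),
  Dom_fracCipher cipher keylen → Pre_fracCipher cipher keylen →
  Spec_fracCipher cipher keylen (fracCipher cipher keylen)

-- ===== LEMMAS AND PROOFS =====

-- the chars of cs at positions i, i+k, i+2k, …
def everyNth {α : Type} : List α → Nat → Nat → List α
  | [], _, _ => []
  | x :: xs, 0, k => x :: everyNth xs (k - 1) k
  | _ :: xs, i + 1, k => everyNth xs i k

lemma everyNth_of_len_le {α : Type} : ∀ (xs : List α) (i k : Nat), xs.length ≤ i →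
    everyNth xs i k = [] := by
  intro xs; induction xs with
  | nil => intro i k _; rfl
  | cons x xs ih =>
    intro i k h
    cases i with
    | zero => simp at h
    | succ i' => exact ih i' k (by simpa using h)

lemma filterMap_range_everyNth {α : Type} (k : Nat) (hk : 0 < k) :
    ∀ (xs : List α) (i m : Nat), xs.length ≤ i + k * m →
    (List.range m).filterMap (fun j => xs[i + k * j]?) = everyNth xs i k := by
  intro xs; induction xs with
  | nil => intro i m _; simp [everyNth]
  | cons x xs ih =>
    intro i m h
    cases i with
    | zero =>
      cases m with
      | zero => simp at h
      | succ m' =>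
        rw [List.range_succ_eq_map, List.filterMap_cons, List.filterMap_map]
        simp only [Nat.mul_zero, Nat.add_zero, List.getElem?_cons_zero, Function.comp]
        have hidx : ∀ j : Nat, 0 + k * Nat.succ j = ((k - 1) + k * j) + 1 := by
          intro j; have := Nat.mul_succ k j; omega
        simp only [hidx, List.getElem?_cons_succ]
        rw [ih (k - 1) m' (by
          simp at h
          have hms : k * (m' + 1) = k * m' + k := by ring
          omega)]
        rfl
    | succ i' =>
      have hidx : ∀ j : Nat, (i' + 1) + k * j = (i' + k * j) + 1 := by intro j; omega
      simp only [hidx, List.getElem?_cons_succ]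
      rw [ih i' m (by simp at h; omega)]
      rfl

lemma slice?_stride (xs : List Char) (i k : Nat) (hk : 0 < k) :
    PySem.List.slice? xs (some (i : Int)) none (k : Int) = some (everyNth xs i k) := by
  have hkpos : (0 : Int) < (k : Int) := by exact_mod_cast hk
  simp only [PySem.List.slice?, PySem.List.sliceIndices,
    if_neg (show ¬((k : Int) = 0) by omega), if_neg (show ¬((k : Int) < 0) by omega),
    if_neg (show ¬((i : Int) < 0) by omega), if_pos hkpos]
  by_cases hB : i < xs.length
  · have hmin : min (i : Int) (xs.length : Int) = (i : Int) := by
      apply min_eq_left; exact_mod_cast Nat.le_of_lt hB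
    rw [hmin, if_pos (by exact_mod_cast hB)]
    set a : Int := ((xs.length : Int) - (i : Int)) + (k : Int) - 1 with ha
    have ha0 : 0 ≤ a := by omega
    set q : Int := a / (k : Int) with hqdef
    have hq0 : 0 ≤ q := Int.ediv_nonneg ha0 (le_of_lt hkpos)
    have hkq : (xs.length : Int) - (i : Int) ≤ (k : Int) * q := by
      have h1 := Int.mul_ediv_add_emod a (k : Int)
      have h2 := Int.emod_lt_of_pos a hkpos
      rw [← hqdef] at h1
      linarith
    have hmle : xs.length ≤ i + k * q.toNat := by
      have hc : (k : Int) * q = ((k * q.toNat : Nat) : Int) := by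
        push_cast [Int.toNat_of_nonneg hq0]; ring
      rw [hc] at hkq; omega
    have hidx : ∀ j : Nat, ((i : Int) + (k : Int) * (j : Nat)).toNat = i + k * j := by
      intro j; omega
    simp only [hidx]
    rw [filterMap_range_everyNth k hk xs i q.toNat hmle]
  · have hmin : min (i : Int) (xs.length : Int) = (xs.length : Int) := by
      apply min_eq_right; exact_mod_cast Nat.le_of_not_lt hB
    rw [hmin, if_neg (by omega)]
    simp [everyNth_of_len_le xs i k (Nat.le_of_not_lt hB)]

-- building the initial list of keylen empty columns
lemma foldl_append_const {α : Type} (v : α) : ∀ (l : List Int) (a : List α),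
    l.foldl (fun acc _ => acc ++ [v]) a = a ++ List.replicate l.length v := by
  intro l; induction l with
  | nil => simp
  | cons x l ih =>
    intro a
    rw [List.foldl_cons, ih]
    simp [List.replicate_succ]

lemma mapIdx_ext {α β : Type} : ∀ (l : List α) (f g : Nat → α → β),
    (∀ j a, f j a = g j a) → l.mapIdx f = l.mapIdx g := by
  intro l; induction l with
  | nil => intro f g _; rfl
  | cons x l ih =>
    intro f g h
    rw [List.mapIdx_cons, List.mapIdx_cons, h 0 x, ih _ _ (fun j a => h (j + 1) a)]

lemma mapIdx_id' {α : Type} (l : List α) : l.mapIdx (fun _ a => a) = l := by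
  apply List.ext_getElem <;> simp

lemma pyAppendAt_eq_mapIdx : ∀ (xs : List (List Char)) (r : Nat) (c : Char), r < xs.length →
    pyAppendAt xs (r : Int) c = xs.mapIdx (fun j l => if j = r then l ++ [c] else l) := by
  intro xs; induction xs with
  | nil => intro r c h; simp at h
  | cons x rest ih =>
    intro r c h
    cases r with
    | zero =>
      simp only [Nat.cast_zero, pyAppendAt, List.mapIdx_cons]
      norm_num
      rw [mapIdx_ext rest _ (fun _ l => l) (by intro j a; simp), mapIdx_id']
    | succ r' =>
      simp only [pyAppendAt, List.mapIdx_cons]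
      rw [if_neg (by exact_mod_cast Nat.succ_ne_zero r'),
          if_neg (by exact Nat.zero_ne_add_one r')]
      have hcast : ((Nat.succ r' : Nat) : Int) - 1 = ((r' : Nat) : Int) := by push_cast; ring
      rw [hcast, ih r' c (by simpa using h)]
      congr 1
      apply mapIdx_ext
      intro j a
      simp [Nat.add_right_cancel_iff]

-- chars of cs appended by the loop to column j, counter starting at t
def pick (n : Int) : List Char → Int → Nat → List Char
  | [], _, _ => []
  | c :: cs, t, j => (if (PySem.Int.mod t n).toNat = j then [c] else []) ++ pick n cs (t + 1) j

lemma loop_inv (n : Int) (hn : 0 < n) : ∀ (cs : List Char) (lss : List (List Char)) (t : Int),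
    lss.length = n.toNat →
    (cs.foldl (fun (p : List (List Char) × Int) c =>
        (pyAppendAt p.1 (PySem.Int.mod p.2 n) c, p.2 + 1)) (lss, t)).1
      = lss.mapIdx (fun j l => l ++ pick n cs t j) := by
  intro cs; induction cs with
  | nil =>
    intro lss t _
    simp only [List.foldl_nil]
    rw [mapIdx_ext lss _ (fun _ l => l) (by intro j a; simp [pick]), mapIdx_id']
  | cons c cs ih =>
    intro lss t hlen
    rw [List.foldl_cons]
    have hr0 : 0 ≤ PySem.Int.mod t n := PySem.Int.mod_nonneg t hn
    have hrlt : PySem.Int.mod t n < n := PySem.Int.mod_lt t hn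
    have hrn : PySem.Int.mod t n = (((PySem.Int.mod t n).toNat : Nat) : Int) :=
      (Int.toNat_of_nonneg hr0).symm
    rw [show (pyAppendAt lss (PySem.Int.mod t n) c, t + 1)
          = (pyAppendAt lss (((PySem.Int.mod t n).toNat : Nat) : Int) c, t + 1) by rw [← hrn]]
    rw [pyAppendAt_eq_mapIdx lss (PySem.Int.mod t n).toNat c (by omega)]
    rw [ih _ (t + 1) (by simp [hlen])]
    rw [List.mapIdx_mapIdx]
    apply mapIdx_ext
    intro j a
    simp only [Function.comp, pick]
    by_cases hj : j = (PySem.Int.mod t n).toNat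
    · rw [if_pos hj, if_pos hj.symm]; simp
    · rw [if_neg hj, if_neg (fun h => hj h.symm)]; simp

lemma pick_eq_everyNth (n : Int) (hn : 0 < n) : ∀ (cs : List Char) (t : Int) (j : Nat),
    j < n.toNat →
    pick n cs t j = everyNth cs (((j : Int) - t) % n).toNat n.toNat := by
  intro cs; induction cs with
  | nil =>
    intro t j _
    rw [pick, everyNth_of_len_le]
    simp
  | cons c cs ih =>
    intro t j hj
    have hjn : (j : Int) < n := by omega
    have hmod : PySem.Int.mod t n = t % n := PySem.Int.mod_eq_emod_of_pos hn
    set o : Int := ((j : Int) - t) % n with ho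
    have ho0 : 0 ≤ o := Int.emod_nonneg _ (ne_of_gt hn)
    have holt : o < n := Int.emod_lt_of_pos _ hn
    -- the loop writes to column j now iff the stride offset o is 0
    have hkey : ((PySem.Int.mod t n).toNat = j) ↔ (o = 0) := by
      rw [hmod]
      constructor
      · intro h
        have htj : t % n = (j : Int) := by
          have h0 : 0 ≤ t % n := Int.emod_nonneg _ (ne_of_gt hn)
          omega
        have hsub : ((j : Int) - t) % n = ((j : Int) % n - t % n) % n := by
          rw [Int.sub_emod]
        rw [ho, hsub, htj, Int.emod_eq_of_lt (by omega) hjn, sub_self, Int.zero_emod]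
      · intro h
        have hdvd : n ∣ ((j : Int) - t) := Int.dvd_of_emod_eq_zero (ho ▸ h)
        have h3 : n ∣ (t - (j : Int)) := by
          have h4 := (Int.dvd_neg).mpr hdvd
          rwa [neg_sub] at h4
        have h5 : t % n = (j : Int) % n := by
          rw [Int.emod_eq_emod_iff_emod_sub_eq_zero]
          exact Int.emod_eq_zero_of_dvd h3
        rw [h5, Int.emod_eq_of_lt (by omega) hjn]
        omega
    -- the stride offset one step later
    have hnext : ((j : Int) - (t + 1)) % n = (o - 1) % n := by
      rw [Int.emod_eq_emod_iff_emod_sub_eq_zero]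
      have hdq : n ∣ (((j : Int) - (t + 1)) - (o - 1)) := by
        have h1 : ((j : Int) - t) % n = o := ho.symm
        have h2 : n ∣ (((j : Int) - t) - o) := Int.dvd_of_emod_eq_zero (by
          rw [Int.sub_emod, h1, Int.emod_eq_of_lt ho0 holt, sub_self, Int.zero_emod])
        have : ((j : Int) - (t + 1)) - (o - 1) = ((j : Int) - t) - o := by ring
        rw [this]; exact h2
      exact Int.emod_eq_zero_of_dvd hdq
    by_cases hc : o = 0
    · -- writes c to column j; next offset is n - 1
      have hn1 : ((j : Int) - (t + 1)) % n = n - 1 := by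
        rw [hnext, hc]
        have : ((-1 : Int)) % n = (n - 1) % n := by
          rw [Int.emod_eq_emod_iff_emod_sub_eq_zero]
          have : (-1 : Int) - (n - 1) = -n := by ring
          rw [this]
          exact Int.emod_eq_zero_of_dvd ⟨-1, by ring⟩
        rw [show (0 : Int) - 1 = -1 by ring, this, Int.emod_eq_of_lt (by omega) (by omega)]
      rw [pick, if_pos (hkey.mpr hc), ih (t + 1) j hj, hn1]
      rw [show o.toNat = 0 by omega]
      rw [everyNth]
      rw [show (n - 1 : Int).toNat = n.toNat - 1 by omega]
      rfl
    · -- skips column j; next offset is o - 1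
      have hn1 : ((j : Int) - (t + 1)) % n = o - 1 := by
        rw [hnext, Int.emod_eq_of_lt (by omega) (by omega)]
      rw [pick, if_neg (fun h => hc (hkey.mp h)), ih (t + 1) j hj, hn1]
      rw [show o.toNat = (o - 1).toNat + 1 by omega]
      rfl

-- mapIdx over the initial replicate-list is a map over range
lemma mapIdx_replicate_nil (n : Nat) (g : Nat → List Char) :
    (List.replicate n ([] : List Char)).mapIdx (fun j l => l ++ g j)
      = (List.range n).map g := by
  apply List.ext_getElem
  · simp
  · intro idx h1 h2
    simp [List.getElem_mapIdx]

-- ===== VERDICT (by name: the statement is the Claim_ definition above) =====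
theorem fracCipher_spec : Claim_equal_fracCipher := by
  intro cipher keylen _ hpre
  unfold Spec_fracCipher
  by_cases hk : 1 ≤ keylen
  · -- keylen ≥ 1
    obtain ⟨n, rfl⟩ : ∃ n : Nat, ((n : Nat) : Int) = keylen :=
      ⟨keylen.toNat, Int.toNat_of_nonneg (by omega)⟩
    have hn0 : 0 < n := by exact_mod_cast hk
    have hA : fracCipher cipher ((n : Nat) : Int)
        = (List.range n).map (fun j => String.ofList (everyNth cipher.toList j n)) := by
      unfold fracCipher
      rw [foldl_append_const]
      rw [show ((PySem.List.pyRange 0 ((n : Nat) : Int) 1).length) = n by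
        simp [PySem.List.length_pyRange_one]]
      rw [List.nil_append]
      rw [loop_inv ((n : Nat) : Int) (by exact_mod_cast hn0) cipher.toList
            (List.replicate n []) 0 (by simp)]
      have hcols : ∀ j, j < n →
          pick ((n : Nat) : Int) cipher.toList 0 j = everyNth cipher.toList j n := by
        intro j hj
        rw [pick_eq_everyNth ((n : Nat) : Int) (by exact_mod_cast hn0) cipher.toList 0 j
              (by simpa using hj)]
        rw [show ((j : Int) - 0) = (j : Int) by ring,
            Int.emod_eq_of_lt (by omega) (by exact_mod_cast hj)]
        simp
      rw [mapIdx_ext _ _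
            (fun j l => l ++ (if h : j < n then everyNth cipher.toList j n
                              else pick ((n : Nat) : Int) cipher.toList 0 j))
            (by intro j a; by_cases hj : j < n <;> simp [hj, hcols])]
      rw [mapIdx_replicate_nil, List.map_map]
      apply List.map_congr_left
      intro j hj
      simp only [Function.comp]
      rw [dif_pos (List.mem_range.mp hj)]
    have hB : fracCipher_alt cipher ((n : Nat) : Int)
        = (List.range n).map (fun j => String.ofList (everyNth cipher.toList j n)) := by
      unfold fracCipher_alt
      rw [PySem.List.pyRange_one]
      rw [show (((n : Nat) : Int) - 0).toNat = n by omega]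
      rw [List.map_map]
      apply List.map_congr_left
      intro j hj
      simp only [Function.comp, zero_add]
      rw [PySem.Str.slice?, PySem.Chars.slice?_eq_listSlice?,
          slice?_stride cipher.toList j n hn0]
      rfl
    rw [hA, hB]
  · -- keylen ≤ 0, so Pre_ gives cipher = ""
    have hc : cipher = "" := hpre.resolve_left hk
    subst hc
    have hnil : PySem.List.pyRange 0 keylen 1 = [] :=
      PySem.List.pyRange_one_eq_nil (by omega)
    simp [fracCipher, fracCipher_alt, hnil]
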